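-- pv_equiv track=rewrite | github.com/joehohoho/market-signal-lab | src/data/ingest.py | _timeframe_to_seconds
-- ===== SOURCE A (Python) =====
-- def _timeframe_to_seconds(timeframe: str) -> int:
--     """Convert a timeframe string to an approximate number of seconds."""
--     multipliers = {
--         "m": 60,
--         "h": 3600,
--         "d": 86400,
--         "w": 604800,
--         "wk": 604800,
--     }
--     # e.g. "15m" -> number=15, unit="m"
--     for unit, factor in sorted(multipliers.items(), key=lambda x: -len(x[0])):
--         if timeframe.endswith(unit):
--             try:
--                 number = int(timeframe[: -len(unit)])
--                 return number * factor
--             except ValueError: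
--                 break
--     # Fallback: 1 day
--     return 86400
-- ===== SOURCE B (Python) =====
-- def _timeframe_to_seconds(timeframe: str) -> int:
--     """Convert a timeframe string to an approximate number of seconds."""
--     multipliers = {
--         "m": 60,
--         "h": 3600,
--         "d": 86400,
--         "w": 604800,
--         "wk": 604800,
--     }
--     # The unit is a suffix of the string; keys are at most 2 chars long,
--     # so try the 2-char suffix first, then the 1-char suffix.
--     unit_len = 2
--     factor = multipliers.get(timeframe[-2:])
--     if factor is None:
--         unit_len = 1
--         factor = multipliers.get(timeframe[-1:])
--     if factor is None:
--         return 86400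
--     try:
--         return int(timeframe[:-unit_len]) * factor
--     except ValueError:
--         return 86400
-- ===== Notes on version B (the rewrite author's own statement) =====
-- stated objective: simpler
-- what changed: B derives the unit directly from the string's end (dict keys are at most 2 chars, so one lookup of the 2-char suffix, then of the 1-char suffix) instead of A's loop over the sorted key list testing endswith on each.
import Mathlib
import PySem

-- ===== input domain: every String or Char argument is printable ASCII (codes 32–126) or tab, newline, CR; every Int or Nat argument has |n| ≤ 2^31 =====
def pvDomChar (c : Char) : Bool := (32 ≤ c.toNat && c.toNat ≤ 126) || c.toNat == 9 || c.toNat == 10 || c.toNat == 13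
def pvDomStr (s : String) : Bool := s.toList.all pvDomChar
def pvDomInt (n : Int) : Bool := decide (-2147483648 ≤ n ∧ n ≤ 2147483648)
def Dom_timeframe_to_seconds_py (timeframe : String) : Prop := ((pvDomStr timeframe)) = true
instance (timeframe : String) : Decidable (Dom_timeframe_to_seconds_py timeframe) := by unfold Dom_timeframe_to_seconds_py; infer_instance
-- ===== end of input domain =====

-- ===== PORT A =====
-- helper: the for-loop over the sorted (unit, factor) pairs; `break` falls through to the 86400 fallback
def pvGoA : List (String × Int) → String → Int
  | [], _ => 86400
  | (u, f) :: rest, tf =>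
    if PySem.Str.endswith tf u then
      match PySem.Int.ofStr? (PySem.Str.slice tf none (some (-(PySem.Str.len u)))) with
      | some n => n * f
      | none => 86400          -- ValueError: `break`, then fallback
    else pvGoA rest tf

def timeframe_to_seconds_py (timeframe : String) : Int :=
  let multipliers : PySem.Dict String Int :=
    PySem.Dict.ofList [("m", 60), ("h", 3600), ("d", 86400), ("w", 604800), ("wk", 604800)]
  pvGoA (PySem.List.sorted multipliers.items (fun x => -(PySem.Str.len x.1)) false) timeframe

-- ===== PORT B =====
-- B: the unit is a suffix of the string and keys are at most 2 chars long,
-- so try the 2-char suffix, then the 1-char suffix, by direct dict lookup (no loop over units).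
def timeframe_to_seconds_py_alt (timeframe : String) : Int :=
  let multipliers : PySem.Dict String Int :=
    PySem.Dict.ofList [("m", 60), ("h", 3600), ("d", 86400), ("w", 604800), ("wk", 604800)]
  let unitLen : Int := 2
  let factor := PySem.Dict.get? multipliers (PySem.Str.slice timeframe (some (-2)) none)
  let p :=
    match factor with
    | none => ((1 : Int), PySem.Dict.get? multipliers (PySem.Str.slice timeframe (some (-1)) none))
    | some f => (unitLen, some f)
  match p.2 with
  | none => 86400
  | some f =>
    match PySem.Int.ofStr? (PySem.Str.slice timeframe none (some (-p.1))) with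
    | some n => n * f
    | none => 86400

-- ===== PRECONDITION & SPEC =====
def Spec_timeframe_to_seconds_py (timeframe : String) (out : Int) : Prop := out = timeframe_to_seconds_py_alt timeframe
instance (timeframe : String) (out : Int) : Decidable (Spec_timeframe_to_seconds_py timeframe out) := by unfold Spec_timeframe_to_seconds_py; infer_instance

-- ===== CLAIM (what is proved, stated in full; the proofs are below) =====
def Claim_equal_timeframe_to_seconds_py : Prop := ∀ (timeframe : String), Dom_timeframe_to_seconds_py timeframe → Spec_timeframe_to_seconds_py timeframe (timeframe_to_seconds_py timeframe)

-- ===== LEMMAS AND PROOFS =====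
lemma pvOfListEq (cs : List Char) (s : String) : (String.ofList cs = s) ↔ cs = s.toList := by
  constructor
  · intro h; simpa [String.toList_ofList] using congrArg String.toList h
  · intro h; subst h; exact String.ofList_toList

lemma pvBeqList (s : String) (cs : List Char) : (s == String.ofList cs) = decide (s.toList = cs) := by
  rw [Bool.beq_eq_decide_eq]
  simp only [eq_comm (a := s), pvOfListEq, eq_comm (a := cs)]

lemma pvSliceFrom2 (r : List Char) :
    PySem.Str.slice (String.ofList r.reverse) (some (-2)) none = String.ofList (r.take 2).reverse := by
  simp only [PySem.Str.slice, String.toList_ofList, PySem.Chars.slice_eq_listSlice]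
  rw [PySem.List.slice_from_neg_ofNat _ 2 (by norm_num)]
  rw [List.reverse_take, List.length_reverse]

lemma pvSliceFrom1 (r : List Char) :
    PySem.Str.slice (String.ofList r.reverse) (some (-1)) none = String.ofList (r.take 1).reverse := by
  simp only [PySem.Str.slice, String.toList_ofList, PySem.Chars.slice_eq_listSlice]
  rw [PySem.List.slice_from_neg_one]
  rw [List.reverse_take, List.length_reverse]

lemma pvSliceTo2 (r : List Char) :
    PySem.Str.slice (String.ofList r.reverse) none (some (-2)) = String.ofList (r.drop 2).reverse := by
  simp only [PySem.Str.slice, String.toList_ofList, PySem.Chars.slice_eq_listSlice]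
  rw [PySem.List.slice_to_neg_ofNat _ 2 (by norm_num)]
  rw [List.reverse_drop, List.length_reverse]

lemma pvSliceTo1 (r : List Char) :
    PySem.Str.slice (String.ofList r.reverse) none (some (-1)) = String.ofList (r.drop 1).reverse := by
  simp only [PySem.Str.slice, String.toList_ofList, PySem.Chars.slice_eq_listSlice]
  rw [PySem.List.slice_to_neg_one, List.dropLast_eq_take]
  rw [List.reverse_drop, List.length_reverse]

lemma pvEndswith (r : List Char) (u : String) :
    PySem.Str.endswith (String.ofList r.reverse) u = u.toList.reverse.isPrefixOf r := by
  simp [PySem.Str.endswith, String.toList_ofList, PySem.Chars.endswith, List.isSuffixOf]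

lemma pvMain (r : List Char) :
    timeframe_to_seconds_py (String.ofList r.reverse) = timeframe_to_seconds_py_alt (String.ofList r.reverse) := by
  have hs2 : (PySem.List.sorted [("m", (60:Int)), ("h", 3600), ("d", 86400), ("w", 604800), ("wk", 604800)] (fun x => -(PySem.Str.len x.1)) false)
      = [("wk", 604800), ("m", 60), ("h", 3600), ("d", 86400), ("w", 604800)] := by decide
  have hm : "m".toList = ['m'] := rfl
  have hh : "h".toList = ['h'] := rfl
  have hd' : "d".toList = ['d'] := rfl
  have hw : "w".toList = ['w'] := rfl
  have hwk : "wk".toList = ['w', 'k'] := rfl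
  have hl2 : PySem.Str.len "wk" = 2 := rfl
  have hl1m : PySem.Str.len "m" = 1 := rfl
  have hl1h : PySem.Str.len "h" = 1 := rfl
  have hl1d : PySem.Str.len "d" = 1 := rfl
  have hl1w : PySem.Str.len "w" = 1 := rfl
  have hd : PySem.Dict.ofList [("m", (60:Int)), ("h", 3600), ("d", 86400), ("w", 604800), ("wk", 604800)]
      = PySem.Dict.mk [("m", 60), ("h", 3600), ("d", 86400), ("w", 604800), ("wk", 604800)] := by decide
  simp only [timeframe_to_seconds_py, timeframe_to_seconds_py_alt, hd,
    PySem.Dict.get?_mk_cons, pvSliceFrom2, pvSliceFrom1, pvBeqList, hs2]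
  simp only [pvGoA, pvEndswith, hm, hh, hd', hw, hwk, hl2, hl1m, hl1h, hl1d, hl1w,
    pvSliceTo2, pvSliceTo1, PySem.Int.ofStr?_ofList]
  match r with
  | [] => decide
  | [c1] =>
    by_cases e1 : c1 = 'k'
    · subst e1; decide
    by_cases e2 : c1 = 'm'
    · subst e2; decide
    by_cases e3 : c1 = 'h'
    · subst e3; decide
    by_cases e4 : c1 = 'd'
    · subst e4; decide
    by_cases e5 : c1 = 'w'
    · subst e5; decide
    simp [List.isPrefixOf, Ne.symm e2, Ne.symm e3, Ne.symm e4, Ne.symm e5, PySem.Dict.get?]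
  | c1 :: c2 :: rs =>
    by_cases e1 : c1 = 'k' ∧ c2 = 'w'
    · obtain ⟨e1a, e1b⟩ := e1; subst e1a; subst e1b
      have hx := pvSliceTo2 ('k' :: 'w' :: rs)
      simp at hx
      simp [List.isPrefixOf, hx, PySem.Int.ofStr?, String.toList_ofList]
    · by_cases em : c1 = 'm'
      · subst em
        have hx := pvSliceTo1 ('m' :: c2 :: rs)
        simp at hx
        simp [List.isPrefixOf, hx, PySem.Dict.get?, PySem.Int.ofStr?, String.toList_append, String.toList_ofList]
      by_cases eh : c1 = 'h'
      · subst eh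
        have hx := pvSliceTo1 ('h' :: c2 :: rs)
        simp at hx
        simp [List.isPrefixOf, hx, PySem.Dict.get?, PySem.Int.ofStr?, String.toList_append, String.toList_ofList]
      by_cases ed : c1 = 'd'
      · subst ed
        have hx := pvSliceTo1 ('d' :: c2 :: rs)
        simp at hx
        simp [List.isPrefixOf, hx, PySem.Dict.get?, PySem.Int.ofStr?, String.toList_append, String.toList_ofList]
      by_cases ew : c1 = 'w'
      · subst ew
        have hx := pvSliceTo1 ('w' :: c2 :: rs)
        simp at hx
        simp [List.isPrefixOf, hx, PySem.Dict.get?, PySem.Int.ofStr?, String.toList_append, String.toList_ofList]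
      by_cases ek : c1 = 'k'
      · have hc2 : ¬ c2 = 'w' := fun h => e1 ⟨ek, h⟩
        subst ek; simp [List.isPrefixOf, Ne.symm hc2, PySem.Dict.get?]
      simp [List.isPrefixOf,
        Ne.symm em, Ne.symm eh, Ne.symm ed, Ne.symm ew, Ne.symm ek, PySem.Dict.get?]

-- ===== VERDICT (by name: the statement is the Claim_ definition above) =====
theorem timeframe_to_seconds_py_spec : Claim_equal_timeframe_to_seconds_py := by
  intro timeframe _
  unfold Spec_timeframe_to_seconds_py
  have h := pvMain timeframe.toList.reverse
  rw [List.reverse_reverse, String.ofList_toList] at h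
  exact h
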